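-- pv_equiv track=rewrite | github.com/KingCatZero/AlgoExpert | Very Hard/squareOfZeroes.py | buildCounterMatrix
-- ===== SOURCE A (Python) =====
-- def buildCounterMatrix(matrix):
--     counts = [row[:] for row in matrix]
--
--     for i in range(len(matrix) - 1, -1, -1):
--         for j in range(len(matrix) - 1, -1, -1):
--             counts[i][j] = [0, 0]
--
--             if matrix[i][j] == 0:
--                 counts[i][j][0] = zerosBelow(counts, matrix, i, j)
--                 counts[i][j][1] = zerosRight(counts, matrix, i, j)
--
--     return counts
--
-- def zerosBelow(counts, matrix, i, j):
--     if (i == len(matrix) - 1) or (matrix[i + 1][j] == 1):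
--         return 0
--
--     return counts[i + 1][j][0] + 1
--
-- def zerosRight(counts, matrix, i, j):
--     if (j == len(matrix) - 1) or (matrix[i][j + 1] == 1):
--         return 0
--
--     return counts[i][j + 1][1] + 1
-- ===== SOURCE B (Python) =====
-- def buildCounterMatrix(matrix):
--     n = len(matrix)
--
--     def runs(line):
--         # out[i]: length of the run of zeros starting just below/right of a zero cell;
--         # a 1 ends the run, and run values only matter at zero cells.
--         out = [0] * len(line)
--         for i in range(len(line) - 2, -1, -1):
--             if line[i] == 0 and line[i + 1] != 1:
--                 out[i] = out[i + 1] + 1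
--         return out
--
--     rights = [runs(row) for row in matrix]
--     belows = [runs(col) for col in zip(*matrix)]
--     return [[[belows[j][i], rights[i][j]] for j in range(n)] for i in range(n)]
-- ===== Notes on version B (the rewrite author's own statement) =====
-- stated objective: simpler
-- what changed: Instead of one in-place reverse double loop whose helper functions read already-updated cells of the mutated counts grid, B computes the run arrays for each row and each column independently with a one-line 1-D dynamic-programming scan, then assembles the output grid; Pre_ excludes non-square matrices, on which A raises IndexError (short rows) or returns a row mixing bare ints with pairs, not a value of the declared type (long rows).
-- outside the precondition, e.g. on buildCounterMatrix([[-2, 1, 2]]): A returns [[[0, 0], 1, 2]], B returns [[[0, 0]]]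
import Mathlib
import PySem

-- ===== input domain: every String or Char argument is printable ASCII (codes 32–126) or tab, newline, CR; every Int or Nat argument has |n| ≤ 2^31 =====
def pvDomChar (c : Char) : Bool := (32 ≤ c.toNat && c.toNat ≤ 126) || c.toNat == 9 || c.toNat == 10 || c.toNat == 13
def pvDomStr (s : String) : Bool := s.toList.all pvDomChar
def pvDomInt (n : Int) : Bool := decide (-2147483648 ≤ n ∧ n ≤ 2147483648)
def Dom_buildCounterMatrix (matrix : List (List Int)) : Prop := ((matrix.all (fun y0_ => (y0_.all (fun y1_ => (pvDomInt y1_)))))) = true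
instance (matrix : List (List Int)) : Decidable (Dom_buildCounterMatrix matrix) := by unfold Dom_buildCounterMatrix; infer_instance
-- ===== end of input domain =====

-- B replaces A's single in-place reverse double loop (whose helpers read already-updated cells
-- of the mutated counts grid) by independent 1-D dynamic-programming scans of each row and
-- each column, assembled into the output grid at the end.

-- ===== PORT A =====
-- matrix[i][j] (in range under Pre_)
def getMA (matrix : List (List Int)) (i j : Nat) : Int := (matrix.getD i []).getD j 0
-- counts[i][j]
def getCellA (c : List (List (List Int))) (i j : Nat) : List Int := (c.getD i []).getD j []
-- counts[i][j] = v
def setCellA (c : List (List (List Int))) (i j : Nat) (v : List Int) : List (List (List Int)) :=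
  c.set i ((c.getD i []).set j v)

def zerosBelowA (counts : List (List (List Int))) (matrix : List (List Int)) (n i j : Nat) : Int :=
  if i = n - 1 ∨ getMA matrix (i + 1) j = 1 then 0
  else (getCellA counts (i + 1) j).getD 0 0 + 1

def zerosRightA (counts : List (List (List Int))) (matrix : List (List Int)) (n i j : Nat) : Int :=
  if j = n - 1 ∨ getMA matrix i (j + 1) = 1 then 0
  else (getCellA counts i (j + 1)).getD 1 0 + 1

-- body of A's inner loop: counts[i][j] = [0,0]; if matrix[i][j]==0: counts[i][j][0] = …; counts[i][j][1] = …
def stepA (matrix : List (List Int)) (n : Nat) (counts : List (List (List Int))) (i j : Nat) :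
    List (List (List Int)) :=
  let c0 := setCellA counts i j [0, 0]
  if getMA matrix i j = 0 then
    let c1 := setCellA c0 i j ((getCellA c0 i j).set 0 (zerosBelowA c0 matrix n i j))
    setCellA c1 i j ((getCellA c1 i j).set 1 (zerosRightA c1 matrix n i j))
  else c0

def buildCounterMatrix (matrix : List (List Int)) : List (List (List Int)) :=
  let n := matrix.length
  -- Python's initial counts is a copy of matrix (rows of bare ints); under Pre_ every cell is
  -- overwritten before any read and before return, so the initial payload is irrelevant:
  -- it is represented here as [] per cell.
  let init := matrix.map (fun row => row.map (fun _ => ([] : List Int)))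
  -- for i in range(n-1,-1,-1): for j in range(n-1,-1,-1): …
  ((List.range n).reverse).foldl
    (fun counts i => ((List.range n).reverse).foldl (fun c j => stepA matrix n c i j) counts) init

-- ===== PORT B =====
-- Source B's runs(line): out = [0]*len; for i from len-2 down to 0: if line[i]==0 and line[i+1]!=1:
-- out[i] = out[i+1]+1.  Ported as the equivalent structural recursion from the right
-- (the loop fills out back-to-front, each cell from the one after it).
def runsB : List Int → List Int
  | [] => []
  | [_] => [0]
  | v :: w :: rest =>
    let tail := runsB (w :: rest)
    (if v = 0 ∧ w ≠ 1 then tail.headD 0 + 1 else 0) :: tail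

-- zip(*matrix): truncating transpose, exactly Python's zip
def zipT (rows : List (List Int)) : List (List Int) :=
  if h : rows ≠ [] ∧ rows.all (fun r => !r.isEmpty) then
    rows.map (fun r => r.headD 0) :: zipT (rows.map (fun r => r.tail))
  else []
termination_by (rows.headD []).length
decreasing_by
  obtain ⟨h1, h2⟩ := h
  cases rows with
  | nil => exact absurd rfl h1
  | cons r rs =>
    simp only [List.headD_cons]
    have hr : r ≠ [] := by
      have := h2
      simp only [List.all_cons, Bool.and_eq_true, Bool.not_eq_true', List.isEmpty_eq_false_iff] at this
      exact this.1
    cases r with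
    | nil => exact absurd rfl hr
    | cons a as => simp

def buildCounterMatrix_alt (matrix : List (List Int)) : List (List (List Int)) :=
  let n := matrix.length
  let rights := matrix.map runsB
  let belows := (zipT matrix).map runsB
  (List.range n).map (fun i =>
    (List.range n).map (fun j =>
      [(belows.getD j []).getD i 0, (rights.getD i []).getD j 0]))

-- ===== PRECONDITION & SPEC =====
-- Pre_ excludes non-square matrices: a row shorter than the row count makes A raise IndexError,
-- and a longer row makes A return a row mixing bare ints with pairs, which is not a value of the
-- declared List (List (List Int)) type.
def Pre_buildCounterMatrix (matrix : List (List Int)) : Prop :=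
  ∀ row ∈ matrix, row.length = matrix.length
instance (matrix : List (List Int)) : Decidable (Pre_buildCounterMatrix matrix) := by
  unfold Pre_buildCounterMatrix; infer_instance

def pvWitness_buildCounterMatrix : List (List Int) := [[0, 1], [0, 0]]

def Spec_buildCounterMatrix (matrix : List (List Int)) (out : List (List (List Int))) : Prop := out = buildCounterMatrix_alt matrix
instance (matrix : List (List Int)) (out : List (List (List Int))) : Decidable (Spec_buildCounterMatrix matrix out) := by unfold Spec_buildCounterMatrix; infer_instance

-- ===== CLAIM (what is proved, stated in full; the proofs are below) =====
def Claim_equal_buildCounterMatrix : Prop := ∀ (matrix : List (List Int)), Dom_buildCounterMatrix matrix → Pre_buildCounterMatrix matrix → Spec_buildCounterMatrix matrix (buildCounterMatrix matrix)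

-- ===== LEMMAS AND PROOFS =====

-- column j of matrix
def colL (matrix : List (List Int)) (j : Nat) : List Int := matrix.map (fun r => r.getD j 0)
-- intended value of counts[i][j][0] / [1]
def bvS (matrix : List (List Int)) (i j : Nat) : Int := (runsB (colL matrix j)).getD i 0
def rvS (matrix : List (List Int)) (i j : Nat) : Int := (runsB (matrix.getD i [])).getD j 0
-- intended value of counts[i][j]
def cellS (matrix : List (List Int)) (i j : Nat) : List Int := [bvS matrix i j, rvS matrix i j]
-- an n×n grid described by a function
def stateOf (n : Nat) (f : Nat → Nat → List Int) : List (List (List Int)) :=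
  (List.range n).map (fun i => (List.range n).map (f i))
-- state during the inner loop at row i, columns ≥ t done
def fIn (matrix : List (List Int)) (i t : Nat) : Nat → Nat → List Int :=
  fun i' j => if i < i' then cellS matrix i' j
    else if i' = i ∧ t ≤ j then cellS matrix i' j else []
-- state between outer iterations: rows ≥ k done
def gOut (matrix : List (List Int)) (k : Nat) : Nat → Nat → List Int :=
  fun i' j => if k ≤ i' then cellS matrix i' j else []

lemma headD_eq_getD (l : List Int) : l.headD 0 = l.getD 0 0 := by
  cases l <;> rfl

-- the defining recurrence of B's run values, index-wise
lemma runsB_getD (l : List Int) (i : Nat) :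
    (runsB l).getD i 0 =
      if l.getD i 0 = 0 ∧ i + 1 < l.length ∧ l.getD (i + 1) 0 ≠ 1 then
        (runsB l).getD (i + 1) 0 + 1
      else 0 := by
  induction l generalizing i with
  | nil => simp [runsB]
  | cons v rest ih =>
    cases rest with
    | nil =>
      cases i with
      | zero => simp [runsB]
      | succ k => simp [runsB]
    | cons w r2 =>
      cases i with
      | zero =>
        simp only [runsB, List.getD_cons_zero, List.getD_cons_succ, List.length_cons]
        rw [headD_eq_getD]
        by_cases h1 : v = 0
        · by_cases h2 : w = (1 : Int)
          · simp [h1, h2]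
          · simp [h1, h2, Nat.succ_lt_succ (Nat.succ_pos r2.length)]

        · simp [h1]
      | succ k =>
        simp only [runsB, List.getD_cons_succ, List.length_cons]
        rw [ih k]
        by_cases h1 : (w :: r2).getD k 0 = 0
        · by_cases h2 : k + 1 < (w :: r2).length
          · have h2' : k + 1 + 1 < (w :: r2).length + 1 := by omega
            simp [h1, h2, h2']
          · have h2' : ¬ k + 1 + 1 < (w :: r2).length + 1 := by omega
            simp [h1, h2, h2']
        · simp [h1]

lemma getD_range_map {α : Type} (n : Nat) (g : Nat → α) (j : Nat) (d : α) (h : j < n) :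
    ((List.range n).map g).getD j d = g j := by
  rw [List.getD_eq_getElem _ _ (by simpa using h)]
  simp

lemma stateOf_congr {n : Nat} {f g : Nat → Nat → List Int}
    (h : ∀ i < n, ∀ j < n, f i j = g i j) : stateOf n f = stateOf n g := by
  unfold stateOf
  apply List.ext_getElem (by simp)
  intro k h1 h2
  simp only [List.getElem_map, List.getElem_range]
  apply List.ext_getElem (by simp)
  intro l h3 h4
  simp only [List.getElem_map, List.getElem_range]
  exact h k (by simpa using h1) l (by simpa using h3)

lemma getD_set {α : Type} (c : List α) (i i' : Nat) (x d : α) :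
    (c.set i x).getD i' d = if i' = i ∧ i < c.length then x else c.getD i' d := by
  rw [List.getD_eq_getElem?_getD, List.getD_eq_getElem?_getD, List.getElem?_set]
  by_cases h1 : i = i'
  · subst h1
    by_cases h2 : i < c.length <;> simp [h2]
  · rw [if_neg h1, if_neg (fun hh : i' = i ∧ i < c.length => h1 hh.1.symm)]

lemma setCellA_length (c : List (List (List Int))) (i j : Nat) (v : List Int) :
    (setCellA c i j v).length = c.length := by simp [setCellA]

lemma rowlen_setCellA (c : List (List (List Int))) (i j i' : Nat) (v : List Int) :
    ((setCellA c i j v).getD i' []).length = (c.getD i' []).length := by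
  unfold setCellA
  rw [getD_set]
  by_cases h : i' = i ∧ i < c.length
  · rw [if_pos h, List.length_set, h.1]
  · rw [if_neg h]

lemma getCell_setCellA (c : List (List (List Int))) (i j i' j' : Nat) (v : List Int)
    (hi : i < c.length) (hj : j < (c.getD i []).length) :
    getCellA (setCellA c i j v) i' j' = if i' = i ∧ j' = j then v else getCellA c i' j' := by
  unfold getCellA setCellA
  rw [getD_set]
  by_cases h1 : i' = i
  · subst h1
    rw [if_pos ⟨rfl, hi⟩, getD_set]
    by_cases h2 : j' = j
    · rw [if_pos ⟨h2, hj⟩, if_pos ⟨rfl, h2⟩]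
    · rw [if_neg (fun hh => h2 hh.1), if_neg (fun hh => h2 hh.2)]
  · rw [if_neg (fun hh => h1 hh.1), if_neg (fun hh => h1 hh.1)]

lemma stateOf_length {n : Nat} {f : Nat → Nat → List Int} : (stateOf n f).length = n := by
  simp [stateOf]

lemma stateOf_rowlen {n : Nat} {f : Nat → Nat → List Int} {i : Nat} (h : i < n) :
    ((stateOf n f).getD i []).length = n := by
  unfold stateOf
  rw [getD_range_map _ _ _ _ h]
  simp

lemma getCell_stateOf {n : Nat} {f : Nat → Nat → List Int} {i j : Nat} (hi : i < n) (hj : j < n) :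
    getCellA (stateOf n f) i j = f i j := by
  unfold getCellA stateOf
  rw [getD_range_map _ _ _ _ hi, getD_range_map _ _ _ _ hj]

lemma eq_stateOf {c : List (List (List Int))} {n : Nat} {f : Nat → Nat → List Int}
    (h1 : c.length = n) (h2 : ∀ i < n, (c.getD i []).length = n)
    (h3 : ∀ i < n, ∀ j < n, getCellA c i j = f i j) : c = stateOf n f := by
  apply List.ext_getElem (by simp [stateOf, h1])
  intro k hk1 hk2
  have hk : k < n := by rwa [h1] at hk1
  simp only [stateOf, List.getElem_map, List.getElem_range]
  apply List.ext_getElem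
  · have hlk := h2 k hk
    rw [List.getD_eq_getElem c [] hk1] at hlk
    simp [hlk]
  · intro l hl1 hl2
    simp only [List.getElem_map, List.getElem_range]
    have hl : l < n := by simpa using hl2
    have := h3 k hk l hl
    unfold getCellA at this
    rw [List.getD_eq_getElem c [] hk1, List.getD_eq_getElem _ [] hl1] at this
    exact this

lemma colL_length (matrix : List (List Int)) (j : Nat) : (colL matrix j).length = matrix.length := by
  simp [colL]

lemma colL_getD (matrix : List (List Int)) (i j : Nat) (h : i < matrix.length) :
    (colL matrix j).getD i 0 = getMA matrix i j := by
  unfold colL getMA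
  rw [List.getD_eq_getElem _ _ (by simpa using h), List.getElem_map,
    List.getD_eq_getElem _ _ h]

lemma row_length (matrix : List (List Int)) (i : Nat)
    (hpre : Pre_buildCounterMatrix matrix) (h : i < matrix.length) :
    (matrix.getD i []).length = matrix.length := by
  rw [List.getD_eq_getElem _ _ h]
  exact hpre _ (List.getElem_mem h)

-- bvS / rvS vanish on non-zero cells
lemma bvS_nonzero {matrix : List (List Int)} {i j : Nat} (h : getMA matrix i j ≠ 0)
    (hi : i < matrix.length) : bvS matrix i j = 0 := by
  unfold bvS
  rw [runsB_getD]
  rw [if_neg]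
  intro hh
  exact h (by rw [← colL_getD matrix i j hi]; exact hh.1)

lemma rvS_nonzero {matrix : List (List Int)} {i j : Nat} (h : getMA matrix i j ≠ 0) :
    rvS matrix i j = 0 := by
  unfold rvS
  rw [runsB_getD]
  rw [if_neg]
  intro hh
  exact h hh.1

lemma fIn_shift {matrix : List (List Int)} {i t i' j' : Nat} (h : ¬(i' = i ∧ j' = t)) :
    fIn matrix i (t + 1) i' j' = fIn matrix i t i' j' := by
  unfold fIn
  by_cases hlt : i < i'
  · simp [hlt]
  · simp only [if_neg hlt]
    by_cases hii : i' = i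
    · have hjt : ¬ j' = t := fun hh => h ⟨hii, hh⟩
      by_cases hj1 : t + 1 ≤ j'
      · rw [if_pos ⟨hii, hj1⟩, if_pos ⟨hii, by omega⟩]
      · rw [if_neg (fun hh => hj1 hh.2), if_neg (fun hh : i' = i ∧ t ≤ j' => hj1 (by omega))]
    · rw [if_neg (fun hh => hii hh.1), if_neg (fun hh => hii hh.1)]

lemma zerosBelow_eval {matrix : List (List Int)} {counts : List (List (List Int))} {i t : Nat}
    (hm : getMA matrix i t = 0) (hi : i < matrix.length) (ht : t < matrix.length)
    (hc : i + 1 < matrix.length → getCellA counts (i + 1) t = cellS matrix (i + 1) t) :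
    zerosBelowA counts matrix matrix.length i t = bvS matrix i t := by
  unfold zerosBelowA
  have hcol : (colL matrix t).getD i 0 = 0 := by rw [colL_getD _ _ _ hi]; exact hm
  unfold bvS
  rw [runsB_getD]
  by_cases h1 : i + 1 < matrix.length
  · have hni : ¬ i = matrix.length - 1 := by omega
    have hlen : i + 1 < (colL matrix t).length := by rw [colL_length]; exact h1
    by_cases h2 : getMA matrix (i + 1) t = 1
    · rw [if_pos (Or.inr h2), if_neg (fun hh => hh.2.2 (by rw [colL_getD _ _ _ h1]; exact h2))]
    · have h2' : (colL matrix t).getD (i + 1) 0 ≠ 1 := by rw [colL_getD _ _ _ h1]; exact h2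
      rw [if_neg (fun hh => hh.elim hni h2), if_pos ⟨hcol, hlen, h2'⟩, hc h1]
      rfl
  · have hni : i = matrix.length - 1 := by omega
    have hlt : ¬ i + 1 < (colL matrix t).length := by rw [colL_length]; exact h1
    rw [if_pos (Or.inl hni), if_neg (fun hh => hlt hh.2.1)]

lemma zerosRight_eval {matrix : List (List Int)} {counts : List (List (List Int))} {i t : Nat}
    (hpre : Pre_buildCounterMatrix matrix)
    (hm : getMA matrix i t = 0) (hi : i < matrix.length) (ht : t < matrix.length)
    (hc : t + 1 < matrix.length → getCellA counts i (t + 1) = cellS matrix i (t + 1)) :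
    zerosRightA counts matrix matrix.length i t = rvS matrix i t := by
  unfold zerosRightA
  have hrl : (matrix.getD i []).length = matrix.length := row_length matrix i hpre hi
  have hrow : (matrix.getD i []).getD t 0 = 0 := hm
  unfold rvS
  rw [runsB_getD]
  by_cases h1 : t + 1 < matrix.length
  · have hnt : ¬ t = matrix.length - 1 := by omega
    have hlen : t + 1 < (matrix.getD i []).length := by omega
    by_cases h2 : getMA matrix i (t + 1) = 1
    · rw [if_pos (Or.inr h2), if_neg (fun hh => hh.2.2 h2)]
    · have h2' : (matrix.getD i []).getD (t + 1) 0 ≠ 1 := h2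
      rw [if_neg (fun hh => hh.elim hnt h2), if_pos ⟨hrow, hlen, h2'⟩, hc h1]
      rfl
  · have hnt : t = matrix.length - 1 := by omega
    have hlt : ¬ t + 1 < (matrix.getD i []).length := by omega
    rw [if_pos (Or.inl hnt), if_neg (fun hh => hlt hh.2.1)]

lemma stepA_eval {matrix : List (List Int)} {i t : Nat}
    (hpre : Pre_buildCounterMatrix matrix)
    (hi : i < matrix.length) (ht : t < matrix.length) :
    stepA matrix matrix.length (stateOf matrix.length (fIn matrix i (t + 1))) i t =
      stateOf matrix.length (fIn matrix i t) := by
  unfold stepA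
  set c0 := setCellA (stateOf matrix.length (fIn matrix i (t + 1))) i t [0, 0] with hc0
  have hlen0 : c0.length = matrix.length := by rw [hc0, setCellA_length, stateOf_length]
  have hrow0 : ∀ i' < matrix.length, (c0.getD i' []).length = matrix.length := by
    intro i' h
    rw [hc0, rowlen_setCellA]
    exact stateOf_rowlen h
  have hcell0 : ∀ i' < matrix.length, ∀ j' < matrix.length, getCellA c0 i' j' =
      if i' = i ∧ j' = t then [0, 0] else fIn matrix i (t + 1) i' j' := by
    intro i' hi' j' hj'
    rw [hc0, getCell_setCellA _ _ _ _ _ _ (by rw [stateOf_length]; exact hi)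
      (by rw [stateOf_rowlen hi]; exact ht), getCell_stateOf hi' hj']
  by_cases hm : getMA matrix i t = 0
  · rw [if_pos hm]
    have hg0 : getCellA c0 i t = [0, 0] := by rw [hcell0 i hi t ht]; simp
    have hzb : zerosBelowA c0 matrix matrix.length i t = bvS matrix i t := by
      apply zerosBelow_eval hm hi ht
      intro h2
      rw [hcell0 (i + 1) h2 t ht, if_neg (by omega : ¬((i + 1) = i ∧ t = t))]
      unfold fIn
      rw [if_pos (by omega : i < i + 1)]
    rw [hg0, hzb,
      show ([0, 0] : List Int).set 0 (bvS matrix i t) = [bvS matrix i t, 0] from rfl]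
    set c1 := setCellA c0 i t [bvS matrix i t, 0] with hc1
    have hrow1 : ∀ i' < matrix.length, (c1.getD i' []).length = matrix.length := by
      intro i' h
      rw [hc1, rowlen_setCellA]
      exact hrow0 i' h
    have hcell1 : ∀ i' < matrix.length, ∀ j' < matrix.length, getCellA c1 i' j' =
        if i' = i ∧ j' = t then [bvS matrix i t, 0] else fIn matrix i (t + 1) i' j' := by
      intro i' hi' j' hj'
      rw [hc1, getCell_setCellA _ _ _ _ _ _ (by rw [hlen0]; exact hi)
        (by rw [hrow0 i hi]; exact ht)]
      by_cases h : i' = i ∧ j' = t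
      · rw [if_pos h, if_pos h]
      · rw [if_neg h, if_neg h, hcell0 i' hi' j' hj', if_neg h]
    have hg1 : getCellA c1 i t = [bvS matrix i t, 0] := by rw [hcell1 i hi t ht]; simp
    have hzr : zerosRightA c1 matrix matrix.length i t = rvS matrix i t := by
      apply zerosRight_eval hpre hm hi ht
      intro h2
      rw [hcell1 i hi (t + 1) h2, if_neg (by omega : ¬(i = i ∧ t + 1 = t))]
      unfold fIn
      rw [if_neg (Nat.lt_irrefl i), if_pos ⟨rfl, by omega⟩]
    show setCellA c1 i t ((getCellA c1 i t).set 1 (zerosRightA c1 matrix matrix.length i t)) =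
      stateOf matrix.length (fIn matrix i t)
    rw [hg1, hzr,
      show ([bvS matrix i t, 0] : List Int).set 1 (rvS matrix i t) =
        [bvS matrix i t, rvS matrix i t] from rfl]
    apply eq_stateOf
    · rw [setCellA_length, hc1, setCellA_length, hlen0]
    · intro i' h
      rw [rowlen_setCellA]
      exact hrow1 i' h
    · intro i' hi' j' hj'
      rw [getCell_setCellA _ _ _ _ _ _ (by rw [hc1, setCellA_length, hlen0]; exact hi)
        (by rw [hrow1 i hi]; exact ht)]
      by_cases h : i' = i ∧ j' = t
      · obtain ⟨e1, e2⟩ := h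
        subst e1; subst e2
        rw [if_pos ⟨rfl, rfl⟩]
        unfold fIn
        rw [if_neg (Nat.lt_irrefl i'), if_pos ⟨rfl, le_refl _⟩]
        rfl
      · rw [if_neg h, hcell1 i' hi' j' hj', if_neg h, fIn_shift h]
  · rw [if_neg hm]
    apply eq_stateOf hlen0 hrow0
    intro i' hi' j' hj'
    rw [hcell0 i' hi' j' hj']
    by_cases h : i' = i ∧ j' = t
    · obtain ⟨e1, e2⟩ := h
      subst e1; subst e2
      rw [if_pos ⟨rfl, rfl⟩]
      unfold fIn
      rw [if_neg (Nat.lt_irrefl i'), if_pos ⟨rfl, le_refl _⟩]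
      unfold cellS
      rw [bvS_nonzero hm hi', rvS_nonzero hm]
    · rw [if_neg h, fIn_shift h]

lemma inner_loop {matrix : List (List Int)} {i : Nat}
    (hpre : Pre_buildCounterMatrix matrix) (hi : i < matrix.length) :
    ∀ t, t ≤ matrix.length →
      List.foldl (fun c j => stepA matrix matrix.length c i j)
        (stateOf matrix.length (fIn matrix i t)) ((List.range t).reverse) =
      stateOf matrix.length (fIn matrix i 0) := by
  intro t
  induction t with
  | zero => intro _; rfl
  | succ t ih =>
    intro ht
    rw [List.range_succ, List.reverse_append]
    simp only [List.reverse_singleton, List.singleton_append, List.foldl_cons]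
    rw [stepA_eval hpre hi (by omega)]
    exact ih (by omega)

lemma outer_loop {matrix : List (List Int)}
    (hpre : Pre_buildCounterMatrix matrix) :
    ∀ k, k ≤ matrix.length →
      List.foldl
        (fun counts i =>
          List.foldl (fun c j => stepA matrix matrix.length c i j) counts
            ((List.range matrix.length).reverse))
        (stateOf matrix.length (gOut matrix k)) ((List.range k).reverse) =
      stateOf matrix.length (gOut matrix 0) := by
  intro k
  induction k with
  | zero => intro _; rfl
  | succ k ih =>
    intro hk
    rw [List.range_succ, List.reverse_append]
    simp only [List.reverse_singleton, List.singleton_append, List.foldl_cons]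
    have h1 : stateOf matrix.length (gOut matrix (k + 1)) =
        stateOf matrix.length (fIn matrix k matrix.length) := by
      apply stateOf_congr
      intro i' _ j hj
      unfold gOut fIn
      by_cases h : k < i' <;> simp [h] <;> omega
    have h2 : stateOf matrix.length (fIn matrix k 0) =
        stateOf matrix.length (gOut matrix k) := by
      apply stateOf_congr
      intro i' _ j _
      unfold gOut fIn
      by_cases h : k < i'
      · simp [h]; omega
      · by_cases h' : i' = k <;> simp [h, h'] <;> omega
    rw [h1, inner_loop hpre (by omega) matrix.length (le_refl _), h2]
    exact ih (by omega)

lemma init_eq {matrix : List (List Int)} (hpre : Pre_buildCounterMatrix matrix) :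
    matrix.map (fun row => row.map (fun _ => ([] : List Int))) =
      stateOf matrix.length (gOut matrix matrix.length) := by
  unfold stateOf
  apply List.ext_getElem (by simp)
  intro k h1 h2
  simp only [List.getElem_map, List.getElem_range]
  have hk : k < matrix.length := by simpa using h1
  apply List.ext_getElem
  · simp [hpre _ (List.getElem_mem hk)]
  · intro l h3 h4
    simp only [List.getElem_map, List.getElem_range]
    unfold gOut
    have : ¬ matrix.length ≤ k := by omega
    simp [this]

-- zip(*matrix) on a rectangular matrix is the list of its columns
lemma zipT_rect : ∀ (k : Nat) (rows : List (List Int)), rows ≠ [] →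
    (∀ r ∈ rows, r.length = k) →
    zipT rows = (List.range k).map (fun j => rows.map (fun r => r.getD j 0)) := by
  intro k
  induction k with
  | zero =>
    intro rows hne hlen
    rw [zipT]
    rw [dif_neg]
    · simp
    · intro hh
      obtain ⟨r, hr⟩ := List.exists_mem_of_ne_nil rows hne
      have := hh.2
      rw [List.all_eq_true] at this
      have h2 := this r hr
      have h3 := hlen r hr
      rw [List.length_eq_zero_iff] at h3
      simp [h3] at h2
  | succ k ih =>
    intro rows hne hlen
    rw [zipT]
    rw [dif_pos]
    · have hmapne : rows.map (fun r => r.tail) ≠ [] := by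
        simpa using hne
      have hmaplen : ∀ r ∈ rows.map (fun r => r.tail), r.length = k := by
        intro r hr
        rw [List.mem_map] at hr
        obtain ⟨r0, hr0, rfl⟩ := hr
        have := hlen r0 hr0
        simp [this]
      rw [ih _ hmapne hmaplen, List.range_succ_eq_map]
      simp only [List.map_cons, List.map_map]
      congr 1
      · apply List.map_congr_left
        intro r hr
        rw [headD_eq_getD]
      · apply List.map_congr_left
        intro j _
        simp only [Function.comp]
        apply List.map_congr_left
        intro r hr
        have hlr := hlen r hr
        cases r with
        | nil => simp at hlr
        | cons a as => simp
    · constructor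
      · exact hne
      · rw [List.all_eq_true]
        intro r hr
        have := hlen r hr
        cases r with
        | nil => simp at this
        | cons a as => simp

lemma alt_eq {matrix : List (List Int)} (hpre : Pre_buildCounterMatrix matrix) :
    buildCounterMatrix_alt matrix = stateOf matrix.length (gOut matrix 0) := by
  unfold buildCounterMatrix_alt stateOf
  apply List.map_congr_left
  intro i hi
  have hi' : i < matrix.length := List.mem_range.mp hi
  apply List.map_congr_left
  intro j hj
  have hj' : j < matrix.length := List.mem_range.mp hj
  have hb : (((zipT matrix).map runsB).getD j []).getD i 0 = bvS matrix i j := by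
    cases hcase : matrix with
    | nil => simp [hcase] at hi'
    | cons r0 rs =>
      rw [← hcase]
      have hne : matrix ≠ [] := by rw [hcase]; simp
      rw [zipT_rect matrix.length matrix hne (fun r hr => hpre r hr), List.map_map]
      rw [getD_range_map _ _ _ _ hj']
      rfl
  have hr : ((matrix.map runsB).getD i []).getD j 0 = rvS matrix i j := by
    have h1 : (matrix.map runsB).getD i [] = runsB (matrix.getD i []) := by
      rw [List.getD_eq_getElem _ _ (by simpa using hi'), List.getElem_map,
        List.getD_eq_getElem _ _ hi']
    rw [h1]
    rfl
  rw [hb, hr]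
  unfold gOut
  rw [if_pos (Nat.zero_le i)]
  rfl

-- ===== VERDICT (by name: the statement is the Claim_ definition above) =====
theorem buildCounterMatrix_spec : Claim_equal_buildCounterMatrix := by
  intro matrix _ hpre
  unfold Spec_buildCounterMatrix
  show buildCounterMatrix matrix = buildCounterMatrix_alt matrix
  rw [alt_eq hpre]
  unfold buildCounterMatrix
  rw [init_eq hpre]
  exact outer_loop hpre matrix.length (le_refl _)
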